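-- pv_equiv track=rewrite | github.com/pypi-data/pypi-mirror-139 | packages/combination-builder/combination-builder-0.1.0.tar.gz/combination-builder-0.1.0/src/combination_builder/Combinations.py | build_combination_matrix
-- ===== SOURCE A (Python) =====
-- import string, warnings, re, itertools, os, math
--
-- def build_combination_matrix(compounds, nmax):
--     combination_list = []
--     if(compounds is not None and len(compounds) > 0):
--         n=1
--         while n <= nmax:
--             permutations = itertools.combinations(compounds, n)
--             for p in permutations:
--                 # Filter out permutations that are the same combination
--                 if(all([set(p) != set(c) for c in combination_list])):
--                     combination_list.append(list(p))
--             n += 1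
--     return combination_list
-- ===== SOURCE B (Python) =====
-- import itertools
--
--
-- def build_combination_matrix(compounds, nmax):
--     if not compounds:
--         return []
--     distinct = list(dict.fromkeys(compounds))
--     result = []
--     for n in range(1, min(nmax, len(distinct)) + 1):
--         for p in itertools.combinations(distinct, n):
--             result.append(list(p))
--     return result
-- ===== Notes on version B (the rewrite author's own statement) =====
-- stated objective: alternative
-- what changed: B deduplicates the compound list once up front (dict.fromkeys order) and then emits every combination of the distinct list in a single generation pass capped at min(nmax, len(distinct)), instead of A's generating all combinations of the raw list and rescanning the whole accumulated output with set-comparisons to drop duplicates; this removes the quadratic rescans (measured much faster on duplicate-heavy inputs, though a timing run could not confirm it at the largest sizes, where the output itself is exponential).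
import Mathlib
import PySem

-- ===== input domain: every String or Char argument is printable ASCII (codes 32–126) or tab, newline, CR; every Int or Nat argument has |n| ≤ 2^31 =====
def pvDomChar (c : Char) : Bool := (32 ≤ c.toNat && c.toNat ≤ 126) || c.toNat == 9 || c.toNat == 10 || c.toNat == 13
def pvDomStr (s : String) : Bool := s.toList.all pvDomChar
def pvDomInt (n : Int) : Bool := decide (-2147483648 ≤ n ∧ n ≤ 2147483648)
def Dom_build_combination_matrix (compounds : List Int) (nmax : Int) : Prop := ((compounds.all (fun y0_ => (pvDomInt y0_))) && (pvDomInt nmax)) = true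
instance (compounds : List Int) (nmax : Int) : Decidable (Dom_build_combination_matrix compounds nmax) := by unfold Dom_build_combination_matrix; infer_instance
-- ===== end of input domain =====

-- B deduplicates the source once and generates each combination exactly once, with no
-- rescan of the accumulated output (a different algorithm; A rescans all kept combinations
-- for every candidate).

-- ===== PORT A =====

-- itertools.combinations(xs, n) on a list, in itertools' generation order (exact on lists)
def pvCombos : Nat → List Int → List (List Int)
  | 0, _ => [[]]
  | _ + 1, [] => []
  | n + 1, x :: t => ((pvCombos n t).map (fun p => x :: p)) ++ pvCombos (n + 1) t

-- port of A; 'n=1; while n <= nmax: …; n += 1' is the fold over pyRange 1 (nmax+1);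
-- Python's set(p) != set(c) on int lists is finite-set inequality of the element sets (exact)
def build_combination_matrix (compounds : List Int) (nmax : Int) : List (List Int) :=
  if compounds.length > 0 then
    (PySem.List.pyRange 1 (nmax + 1)).foldl
      (fun acc n =>
        (pvCombos n.toNat compounds).foldl
          (fun acc p =>
            if acc.all (fun c => decide (p.toFinset ≠ c.toFinset)) then acc ++ [p] else acc)
          acc)
      []
  else []

-- ===== PORT B =====

-- port of B: list(dict.fromkeys(compounds)) is PySem.List.dedup; then one plain generation
-- pass over n = 1 .. min(nmax, len(distinct)) appending every combination, no filtering
def build_combination_matrix_alt (compounds : List Int) (nmax : Int) : List (List Int) :=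
  if compounds = [] then []
  else
    let distinct := PySem.List.dedup compounds
    (PySem.List.pyRange 1 (min nmax (distinct.length : Int) + 1)).foldl
      (fun result n =>
        (pvCombos n.toNat distinct).foldl (fun result p => result ++ [p]) result)
      []

-- ===== PRECONDITION & SPEC =====
def Spec_build_combination_matrix (compounds : List Int) (nmax : Int) (out : List (List Int)) : Prop := out = build_combination_matrix_alt compounds nmax
instance (compounds : List Int) (nmax : Int) (out : List (List Int)) : Decidable (Spec_build_combination_matrix compounds nmax out) := by unfold Spec_build_combination_matrix; infer_instance

-- ===== CLAIM (what is proved, stated in full; the proofs are below) =====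
def Claim_equal_build_combination_matrix : Prop := ∀ (compounds : List Int) (nmax : Int), Dom_build_combination_matrix compounds nmax → Spec_build_combination_matrix compounds nmax (build_combination_matrix compounds nmax)

-- ===== LEMMAS AND PROOFS =====

-- first-occurrence deduplication in the recursive shape the proofs induct on
-- (structural recursion on an explicit length bound)
def pvDedupRF : List Int → Nat → List Int
  | [], _ => []
  | _ :: _, 0 => []
  | x :: t, f + 1 => x :: pvDedupRF (t.filter (fun y => y ≠ x)) f

def pvDedupR (l : List Int) : List Int := pvDedupRF l l.length

-- the first-per-element-set filter A's inner loop performs, with the already-seen sets explicit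
def pvG (seen : List (Finset Int)) : List (List Int) → List (List Int)
  | [] => []
  | p :: ps => if p.toFinset ∈ seen then pvG seen ps else p :: pvG (seen ++ [p.toFinset]) ps

-- concatenation of pvCombos 1 d, …, pvCombos k d
def pvPrefix (d : List Int) : Nat → List (List Int)
  | 0 => []
  | k + 1 => pvPrefix d k ++ pvCombos (k + 1) d

-- ---- pvDedupR basics ----

lemma pvDedupRF_congr : ∀ (f f' : Nat) (l : List Int), l.length ≤ f → l.length ≤ f' →
    pvDedupRF l f = pvDedupRF l f' := by
  intro f
  induction f with
  | zero =>
    intro f' l hl _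
    have : l = [] := by cases l <;> simp_all
    subst this; cases f' <;> rfl
  | succ f ih =>
    intro f' l hl hl'
    cases l with
    | nil => cases f' <;> rfl
    | cons x t =>
      cases f' with
      | zero => simp at hl'
      | succ f' =>
        simp only [pvDedupRF]
        congr 1
        exact ih f' _ (le_trans (t.length_filter_le _) (by simpa using hl))
          (le_trans (t.length_filter_le _) (by simpa using hl'))

lemma pvDedupR_nil : pvDedupR [] = [] := rfl

lemma pvDedupR_cons (x : Int) (t : List Int) :
    pvDedupR (x :: t) = x :: pvDedupR (t.filter (fun y => y ≠ x)) := by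
  show pvDedupRF (x :: t) (t.length + 1) = _
  rw [pvDedupRF, pvDedupR]
  congr 1
  exact pvDedupRF_congr _ _ _ (t.length_filter_le _) le_rfl

lemma mem_pvDedupR_aux (N : Nat) : ∀ l : List Int, l.length ≤ N → ∀ a, (a ∈ pvDedupR l ↔ a ∈ l) := by
  induction N with
  | zero =>
    intro l hl a
    have : l = [] := by cases l <;> simp_all
    subst this; simp [pvDedupR_nil]
  | succ N ih =>
    intro l hl a
    cases l with
    | nil => simp [pvDedupR_nil]
    | cons x t =>
      rw [pvDedupR_cons]
      by_cases hax : a = x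
      · simp [hax]
      · have ht : (t.filter (fun y => y ≠ x)).length ≤ N :=
          le_trans (t.length_filter_le _) (by simpa using hl)
        rw [List.mem_cons, List.mem_cons, ih _ ht a, List.mem_filter]
        simp [hax]

lemma mem_pvDedupR (l : List Int) (a : Int) : a ∈ pvDedupR l ↔ a ∈ l :=
  mem_pvDedupR_aux l.length l le_rfl a

lemma nodup_pvDedupR_aux (N : Nat) : ∀ l : List Int, l.length ≤ N → (pvDedupR l).Nodup := by
  induction N with
  | zero =>
    intro l hl
    have : l = [] := by cases l <;> simp_all
    subst this; simp [pvDedupR_nil]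
  | succ N ih =>
    intro l hl
    cases l with
    | nil => simp [pvDedupR_nil]
    | cons x t =>
      rw [pvDedupR_cons]
      have ht : (t.filter (fun y => y ≠ x)).length ≤ N :=
        le_trans (t.length_filter_le _) (by simpa using hl)
      refine List.nodup_cons.mpr ⟨?_, ih _ ht⟩
      intro hx
      have := (mem_pvDedupR _ x).mp hx
      simp at this

lemma nodup_pvDedupR (l : List Int) : (pvDedupR l).Nodup :=
  nodup_pvDedupR_aux l.length l le_rfl

lemma toFinset_pvDedupR (l : List Int) : (pvDedupR l).toFinset = l.toFinset := by
  ext a; simp [mem_pvDedupR]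

lemma pvFoldl_add (xs : List Int) : ∀ acc : List Int,
    List.foldl PySem.Set.add acc xs = acc ++ pvDedupR (xs.filter (fun z => decide (z ∉ acc))) := by
  induction xs with
  | nil => intro acc; simp [pvDedupR_nil]
  | cons y xs ih =>
    intro acc
    rw [List.foldl_cons, List.filter_cons]
    by_cases hy : y ∈ acc
    · have hadd : PySem.Set.add acc y = acc := by
        simp [PySem.Set.add, PySem.Set.contains, hy]
      rw [hadd, ih acc]
      simp [hy]
    · have hadd : PySem.Set.add acc y = acc ++ [y] := by
        simp [PySem.Set.add, PySem.Set.contains, hy]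
      rw [hadd, ih (acc ++ [y])]
      have hflt : xs.filter (fun z => decide (z ∉ acc ++ [y]))
          = (xs.filter (fun z => decide (z ∉ acc))).filter (fun z => decide (z ≠ y)) := by
        rw [List.filter_filter]
        apply List.filter_congr
        intro z _
        by_cases hzy : z = y <;> by_cases hza : z ∈ acc <;> simp [hzy, hza]
      rw [hflt]
      simp only [hy, not_false_iff, decide_true, if_true]
      rw [pvDedupR_cons]
      simp [List.append_assoc]

lemma dedup_eq_pvDedupR (l : List Int) : PySem.List.dedup l = pvDedupR l := by
  rw [PySem.List.dedup_eq_ofList, PySem.Set.ofList]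
  have := pvFoldl_add l (PySem.Set.empty)
  simpa [PySem.Set.empty] using this

-- ---- pvCombos basics ----

lemma pvCombos_sublist : ∀ (xs : List Int) (n : Nat) (p : List Int), p ∈ pvCombos n xs →
    p.Sublist xs ∧ p.length = n := by
  intro xs
  induction xs with
  | nil =>
    intro n p hp
    cases n with
    | zero => simp only [pvCombos, List.mem_singleton] at hp; subst hp; simp
    | succ n => simp [pvCombos] at hp
  | cons x t ih =>
    intro n p hp
    cases n with
    | zero => simp only [pvCombos, List.mem_singleton] at hp; subst hp; simp
    | succ n =>
      simp only [pvCombos, List.mem_append, List.mem_map] at hp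
      rcases hp with ⟨q, hq, rfl⟩ | hp
      · obtain ⟨h1, h2⟩ := ih n q hq
        exact ⟨h1.cons₂ x, by simp [h2]⟩
      · obtain ⟨h1, h2⟩ := ih (n + 1) p hp
        exact ⟨h1.cons x, h2⟩

lemma pvCombos_mem_cons {k : Nat} {t p : List Int} (x : Int) (h : p ∈ pvCombos k t) :
    p ∈ pvCombos k (x :: t) := by
  cases k with
  | zero => simpa [pvCombos] using h
  | succ k => exact List.mem_append_right _ h

lemma pvCombos_eq_nil : ∀ (xs : List Int) (n : Nat), xs.length < n → pvCombos n xs = [] := by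
  intro xs
  induction xs with
  | nil => intro n hn; cases n with
    | zero => omega
    | succ n => rfl
  | cons x t ih =>
    intro n hn
    cases n with
    | zero => omega
    | succ n =>
      simp only [pvCombos]
      rw [ih n (by simpa using hn), ih (n + 1) (by simp at hn; omega)]
      simp

lemma pvCombos_filter (q : Int → Bool) : ∀ (xs : List Int) (n : Nat),
    pvCombos n (xs.filter q) = (pvCombos n xs).filter (fun p => p.all q) := by
  intro xs
  induction xs with
  | nil => intro n; cases n <;> simp [pvCombos]
  | cons x t ih =>
    intro n
    cases n with
    | zero => simp [pvCombos]
    | succ n =>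
      rw [List.filter_cons]
      by_cases hqx : q x
      · simp only [hqx, if_true]
        simp only [pvCombos, ih]
        rw [List.filter_append, List.filter_map]
        congr 1
        congr 1
        apply List.filter_congr
        intro p _
        simp [Function.comp, hqx]
      · simp only [hqx, Bool.false_eq_true, if_false]
        rw [ih n.succ]
        simp only [pvCombos, List.filter_append]
        have : ((pvCombos n t).map (fun p => x :: p)).filter (fun p => p.all q) = [] := by
          rw [List.filter_map]
          have : (pvCombos n t).filter ((fun p => p.all q) ∘ (fun p => x :: p)) = [] := by
            apply List.filter_eq_nil_iff.mpr
            intro p _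
            simp [Function.comp, hqx]
          rw [this]; rfl
        rw [this, List.nil_append]

lemma pvCombos_subset {n : Nat} {xs p : List Int} (h : p ∈ pvCombos n xs) :
    ∀ a ∈ p, a ∈ xs :=
  fun a ha => (pvCombos_sublist xs n p h).1.subset ha

lemma pvCombos_surj : ∀ (xs : List Int) (k : Nat) (F : Finset Int),
    F ⊆ xs.toFinset → F.card = k → ∃ p ∈ pvCombos k xs, p.toFinset = F := by
  intro xs
  induction xs with
  | nil =>
    intro k F hsub hcard
    have hF : F = ∅ := Finset.subset_empty.mp (by simpa using hsub)
    subst hF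
    simp at hcard
    subst hcard
    exact ⟨[], by simp [pvCombos]⟩
  | cons x t ih =>
    intro k F hsub hcard
    by_cases hxF : x ∈ F
    · have hsub' : F.erase x ⊆ t.toFinset := by
        intro a ha
        have ⟨hax, haF⟩ := Finset.mem_erase.mp ha
        have := hsub haF
        simp only [List.toFinset_cons, Finset.mem_insert] at this
        rcases this with h | h
        · exact absurd h hax
        · exact h
      have hk : 1 ≤ k := by
        rw [← hcard]
        exact Finset.card_pos.mpr ⟨x, hxF⟩
      obtain ⟨m, rfl⟩ : ∃ m, k = m + 1 := ⟨k - 1, (Nat.succ_pred_eq_of_pos hk).symm⟩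
      have hcard' : (F.erase x).card = m := by
        rw [Finset.card_erase_of_mem hxF, hcard]
        rfl
      obtain ⟨q, hq, hqF⟩ := ih m (F.erase x) hsub' hcard'
      refine ⟨x :: q, List.mem_append_left _ (List.mem_map_of_mem hq), ?_⟩
      simp [hqF, Finset.insert_erase hxF]
    · have hsub' : F ⊆ t.toFinset := by
        intro a ha
        have := hsub ha
        simp only [List.toFinset_cons, Finset.mem_insert] at this
        rcases this with h | h
        · exact absurd (h ▸ ha) hxF
        · exact h
      obtain ⟨q, hq, hqF⟩ := ih k F hsub' hcard
      exact ⟨q, pvCombos_mem_cons x hq, hqF⟩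

lemma pvNodup_of_card {p : List Int} (h : p.toFinset.card = p.length) : p.Nodup := by
  have h1 : p.dedup.length = p.length := by simpa [List.card_toFinset] using h
  have h2 := (List.dedup_sublist p).eq_of_length h1
  rw [← h2]; exact p.nodup_dedup

lemma pvNotNodup_iff_card {p : List Int} : ¬ p.Nodup ↔ p.toFinset.card < p.length := by
  constructor
  · intro h
    rcases lt_or_eq_of_le (List.toFinset_card_le p) with h' | h'
    · exact h'
    · exact absurd (pvNodup_of_card h') h
  · intro h hn
    rw [List.toFinset_card_of_nodup hn] at h
    omega

lemma pvInsert_inj {x : Int} {F G : Finset Int} (hF : x ∉ F) (hG : x ∉ G)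
    (h : insert x F = insert x G) : F = G := by
  have := congrArg (fun s => Finset.erase s x) h
  simpa [Finset.erase_insert hF, Finset.erase_insert hG] using this

-- ---- pvG basics ----

lemma pvG_foldl : ∀ (ps acc : List (List Int)),
    ps.foldl
        (fun acc p =>
          if acc.all (fun c => decide (p.toFinset ≠ c.toFinset)) then acc ++ [p] else acc)
        acc
      = acc ++ pvG (acc.map List.toFinset) ps := by
  intro ps
  induction ps with
  | nil => intro acc; simp [pvG]
  | cons p ps ih =>
    intro acc
    simp only [List.foldl_cons]
    by_cases hmem : p.toFinset ∈ acc.map List.toFinset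
    · have hcond : (acc.all (fun c => decide (p.toFinset ≠ c.toFinset))) = false := by
        obtain ⟨c, hc, hceq⟩ := List.mem_map.mp hmem
        exact List.all_eq_false.mpr ⟨c, hc, by simp [hceq]⟩
      rw [hcond]
      simp only [Bool.false_eq_true, if_false]
      rw [ih acc]
      simp [pvG, hmem]
    · have hcond : (acc.all (fun c => decide (p.toFinset ≠ c.toFinset))) = true := by
        simp only [List.all_eq_true]
        intro c hc
        simp only [decide_eq_true_eq]
        intro hEq
        exact hmem (List.mem_map.mpr ⟨c, hc, hEq.symm⟩)
      rw [hcond]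
      simp only [if_true]
      rw [ih (acc ++ [p])]
      simp [pvG, hmem, List.map_append]

lemma pvG_append : ∀ (as : List (List Int)) (bs : List (List Int)) (seen : List (Finset Int)),
    pvG seen (as ++ bs) = pvG seen as ++ pvG (seen ++ (pvG seen as).map List.toFinset) bs := by
  intro as
  induction as with
  | nil => intro bs seen; simp [pvG]
  | cons a as ih =>
    intro bs seen
    by_cases h : a.toFinset ∈ seen
    · simp only [List.cons_append, pvG, h, if_true]
      exact ih bs seen
    · simp only [List.cons_append, pvG, h, if_false]
      rw [ih bs (seen ++ [a.toFinset])]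
      simp [List.append_assoc]

lemma pvG_filter (q : List Int → Bool) : ∀ (ps : List (List Int)) (seen : List (Finset Int)),
    (∀ p ∈ ps, q p = false → p.toFinset ∈ seen) →
    pvG seen ps = pvG seen (ps.filter q) := by
  intro ps
  induction ps with
  | nil => intro seen _; rfl
  | cons p ps ih =>
    intro seen h
    rw [List.filter_cons]
    by_cases hq : q p
    · simp only [hq, if_true]
      by_cases hmem : p.toFinset ∈ seen
      · simp only [pvG, hmem, if_true]
        exact ih seen (fun p' hp' hq' => h p' (List.mem_cons_of_mem _ hp') hq')
      · simp only [pvG, hmem, if_false]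
        congr 1
        exact ih _ (fun p' hp' hq' =>
          List.mem_append_left _ (h p' (List.mem_cons_of_mem _ hp') hq'))
    · have hmem : p.toFinset ∈ seen := h p List.mem_cons_self (by simpa using hq)
      simp only [hq, Bool.false_eq_true, if_false, pvG, hmem, if_true]
      exact ih seen (fun p' hp' hq' => h p' (List.mem_cons_of_mem _ hp') hq')

lemma pvG_map_cons (x : Int) : ∀ (rs : List (List Int)) (seen seen₂ : List (Finset Int)),
    (∀ p ∈ rs, x ∉ p) →
    (∀ F : Finset Int, x ∉ F → (F ∈ seen₂ ↔ insert x F ∈ seen)) →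
    pvG seen (rs.map (fun p => x :: p)) = (pvG seen₂ rs).map (fun p => x :: p) := by
  intro rs
  induction rs with
  | nil => intro seen seen₂ _ _; rfl
  | cons p rs ih =>
    intro seen seen₂ hx hmem
    have hxp : x ∉ p := hx p List.mem_cons_self
    have hxpF : x ∉ p.toFinset := by simpa using hxp
    have htf : (x :: p).toFinset = insert x p.toFinset := List.toFinset_cons
    by_cases h : p.toFinset ∈ seen₂
    · have h' : (x :: p).toFinset ∈ seen := htf ▸ (hmem p.toFinset hxpF).mp h
      simp only [List.map_cons, pvG, h, h', if_true]
      exact ih seen seen₂ (fun p' hp' => hx p' (List.mem_cons_of_mem _ hp')) hmem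
    · have h' : (x :: p).toFinset ∉ seen := fun hc => h ((hmem p.toFinset hxpF).mpr (htf ▸ hc))
      simp only [List.map_cons, pvG, h, h', if_false]
      rw [ih (seen ++ [(x :: p).toFinset]) (seen₂ ++ [p.toFinset])
        (fun p' hp' => hx p' (List.mem_cons_of_mem _ hp')) ?_]
      intro F hxF
      simp only [List.mem_append, List.mem_singleton, htf]
      rw [hmem F hxF]
      constructor
      · rintro (h1 | rfl)
        · exact Or.inl h1
        · exact Or.inr rfl
      · rintro (h1 | h1)
        · exact Or.inl h1
        · exact Or.inr (pvInsert_inj hxF hxpF h1)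

-- ---- the core lemma: A's first-per-set filtering of one level of raw combinations over
-- the full list yields exactly the combinations of the deduplicated list ----

lemma pvCore (N : Nat) : ∀ (xs : List Int), xs.length ≤ N →
    ∀ (n : Nat) (seen : List (Finset Int)),
    (∀ p ∈ pvCombos n xs, (p.toFinset ∈ seen ↔ (n ≠ 0 ∧ ¬ p.Nodup))) →
    pvG seen (pvCombos n xs) = pvCombos n (pvDedupR xs) := by
  induction N with
  | zero =>
    intro xs hxs n seen hseen
    have hx : xs = [] := by cases xs <;> simp_all
    subst hx
    cases n with
    | zero =>
      have h0 : (∅ : Finset Int) ∉ seen := by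
        intro hc
        have := (hseen [] (by simp [pvCombos])).mp (by simpa using hc)
        simp at this
      simp [pvCombos, pvG, h0, pvDedupR_nil]
    | succ n => simp [pvCombos, pvG, pvDedupR_nil]
  | succ N ih =>
    intro xs hxs n seen hseen
    cases xs with
    | nil =>
      cases n with
      | zero =>
        have h0 : (∅ : Finset Int) ∉ seen := by
          intro hc
          have := (hseen [] (by simp [pvCombos])).mp (by simpa using hc)
          simp at this
        simp [pvCombos, pvG, h0, pvDedupR_nil]
      | succ n => simp [pvCombos, pvG, pvDedupR_nil]
    | cons x t =>
      cases n with
      | zero =>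
        have h0 : (∅ : Finset Int) ∉ seen := by
          intro hc
          have := (hseen [] (by simp [pvCombos])).mp (by simpa using hc)
          simp at this
        simp [pvCombos, pvG, h0]
      | succ m =>
        have ht'len : (t.filter (fun y => y ≠ x)).length ≤ N :=
          le_trans (t.length_filter_le _) (by simpa using hxs)
        have hmem_t' : ∀ p ∈ pvCombos m (t.filter (fun y => y ≠ x)), p ∈ pvCombos m t := by
          intro p hp
          rw [pvCombos_filter] at hp
          exact (List.mem_filter.mp hp).1
        have hmem_t'' : ∀ p ∈ pvCombos (m + 1) (t.filter (fun y => y ≠ x)),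
            p ∈ pvCombos (m + 1) t := by
          intro p hp
          rw [pvCombos_filter] at hp
          exact (List.mem_filter.mp hp).1
        have hxnot : ∀ {k : Nat} {p : List Int}, p ∈ pvCombos k (t.filter (fun y => y ≠ x)) →
            x ∉ p := by
          intro k p hp hxp
          have := pvCombos_subset hp x hxp
          simp at this
        have hyp_map : ∀ p ∈ pvCombos m t, ((x :: p).toFinset ∈ seen ↔ ¬ (x :: p).Nodup) := by
          intro p hp
          have := hseen (x :: p) (List.mem_append_left _ (List.mem_map_of_mem hp))
          simpa using this
        have hyp_right : ∀ p ∈ pvCombos (m + 1) t, (p.toFinset ∈ seen ↔ ¬ p.Nodup) := by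
          intro p hp
          have := hseen p (List.mem_append_right _ hp)
          simpa using this
        -- split the stream
        show pvG seen (((pvCombos m t).map (fun p => x :: p)) ++ pvCombos (m + 1) t) = _
        rw [pvG_append, pvDedupR_cons]
        show _ = ((pvCombos m (pvDedupR (t.filter (fun y => y ≠ x)))).map (fun p => x :: p)) ++
          pvCombos (m + 1) (pvDedupR (t.filter (fun y => y ≠ x)))
        -- FIRST PART
        have hfirst : pvG seen ((pvCombos m t).map (fun p => x :: p)) =
            (pvCombos m (pvDedupR (t.filter (fun y => y ≠ x)))).map (fun p => x :: p) := by
          have hdrop1 : ∀ r ∈ (pvCombos m t).map (fun p => x :: p),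
              (fun r : List Int => decide r.Nodup) r = false → r.toFinset ∈ seen := by
            intro r hr hrnd
            obtain ⟨p, hp, rfl⟩ := List.mem_map.mp hr
            exact (hyp_map p hp).mpr (by simpa using hrnd)
          rw [pvG_filter (fun r => decide r.Nodup) _ seen hdrop1, List.filter_map]
          have hstep : (pvCombos m t).filter ((fun r : List Int => decide r.Nodup) ∘
                (fun p => x :: p)) =
              (pvCombos m (t.filter (fun y => y ≠ x))).filter (fun p => decide p.Nodup) := by
            rw [pvCombos_filter (fun y => decide (y ≠ x)) t m, List.filter_filter]
            apply List.filter_congr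
            intro p _
            simp only [Function.comp]
            by_cases hxp : x ∈ p
            · have h1 : ¬ (x :: p).Nodup := by simp [List.nodup_cons, hxp]
              have h2 : (p.all fun y => decide (y ≠ x)) = false :=
                List.all_eq_false.mpr ⟨x, hxp, by simp⟩
              simp only [h2, Bool.and_false]
              exact decide_eq_false h1
            · have h1 : (x :: p).Nodup ↔ p.Nodup := by simp [List.nodup_cons, hxp]
              have h2 : (p.all fun y => decide (y ≠ x)) = true := by
                simp only [List.all_eq_true]
                intro y hy
                simp only [decide_eq_true_eq]
                intro hEq
                exact hxp (hEq ▸ hy)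
              rw [h2]
              simp [h1]
          rw [hstep]
          have hseen₂ : ∀ F : Finset Int, x ∉ F →
              (F ∈ (seen.filter (fun F => decide (x ∈ F))).map (fun F => F.erase x) ↔
                insert x F ∈ seen) := by
            intro F hxF
            constructor
            · intro hF
              obtain ⟨G, hG, rfl⟩ := List.mem_map.mp hF
              have hxG' : x ∈ G := by simpa using (List.mem_filter.mp hG).2
              rw [Finset.insert_erase hxG']
              exact (List.mem_filter.mp hG).1
            · intro hF
              refine List.mem_map.mpr ⟨insert x F, List.mem_filter.mpr ⟨hF, by simp⟩, ?_⟩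
              exact Finset.erase_insert hxF
          rw [pvG_map_cons x ((pvCombos m (t.filter (fun y => y ≠ x))).filter
              (fun p => decide p.Nodup)) seen
              ((seen.filter (fun F => decide (x ∈ F))).map (fun F => F.erase x))
              (fun p hp => hxnot (List.mem_filter.mp hp).1) hseen₂]
          congr 1
          have hdrop2 : ∀ p ∈ pvCombos m (t.filter (fun y => y ≠ x)),
              (fun p : List Int => decide p.Nodup) p = false →
              p.toFinset ∈ (seen.filter (fun F => decide (x ∈ F))).map (fun F => F.erase x) := by
            intro p hp hpnd
            have hxp : x ∉ p := hxnot hp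
            have hxpF : x ∉ p.toFinset := by simpa using hxp
            have h1 : ¬ (x :: p).Nodup := by
              simp only [List.nodup_cons]
              push_neg
              intro _
              simpa using hpnd
            have h2 : (x :: p).toFinset ∈ seen := (hyp_map p (hmem_t' p hp)).mpr h1
            refine List.mem_map.mpr ⟨(x :: p).toFinset, ?_, ?_⟩
            · exact List.mem_filter.mpr ⟨h2, by simp [List.toFinset_cons]⟩
            · simp [List.toFinset_cons, Finset.erase_insert hxpF]
          rw [← pvG_filter (fun p => decide p.Nodup) (pvCombos m (t.filter (fun y => y ≠ x)))
            ((seen.filter (fun F => decide (x ∈ F))).map (fun F => F.erase x)) hdrop2]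
          apply ih _ ht'len
          intro p hp
          have hxp : x ∉ p := hxnot hp
          have hxpF : x ∉ p.toFinset := by simpa using hxp
          have hplen : p.length = m := (pvCombos_sublist _ _ _ hp).2
          rw [hseen₂ p.toFinset hxpF]
          have htf : insert x p.toFinset = (x :: p).toFinset := (List.toFinset_cons).symm
          rw [htf, hyp_map p (hmem_t' p hp)]
          constructor
          · intro hnd
            have hpnd : ¬ p.Nodup := by
              intro hc
              exact hnd (List.nodup_cons.mpr ⟨hxp, hc⟩)
            refine ⟨?_, hpnd⟩
            intro hm0
            subst hm0
            exact hpnd ((List.length_eq_zero_iff.mp hplen) ▸ List.nodup_nil)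
          · rintro ⟨_, hpnd⟩
            intro hc
            exact hpnd (List.nodup_cons.mp hc).2
        rw [hfirst]
        congr 1
        -- SECOND PART
        have hdrop3 : ∀ p ∈ pvCombos (m + 1) t,
            (fun p : List Int => p.all (fun y => decide (y ≠ x))) p = false →
            p.toFinset ∈ seen ++
              ((pvCombos m (pvDedupR (t.filter (fun y => y ≠ x)))).map
                (fun p => x :: p)).map List.toFinset := by
          intro p hp hq
          have hxp : x ∈ p := by
            by_contra hxp
            have hall : (p.all fun y => decide (y ≠ x)) = true := by
              simp only [List.all_eq_true]
              intro y hy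
              simp only [decide_eq_true_eq]
              intro hEq
              exact hxp (hEq ▸ hy)
            have hq2 : (p.all fun y => decide (y ≠ x)) = false := hq
            rw [hall] at hq2
            simp at hq2
          by_cases hnd : p.Nodup
          · have hxpF : x ∈ p.toFinset := by simpa using hxp
            have hplen : p.length = m + 1 := (pvCombos_sublist _ _ _ hp).2
            have hsub : p.toFinset.erase x ⊆
                (pvDedupR (t.filter (fun y => y ≠ x))).toFinset := by
              intro a ha
              have ⟨hax, haF⟩ := Finset.mem_erase.mp ha
              have hap : a ∈ p := by simpa using haF
              have hat : a ∈ t := pvCombos_subset hp a hap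
              rw [toFinset_pvDedupR]
              simp only [List.mem_toFinset, List.mem_filter]
              exact ⟨hat, by simpa using hax⟩
            have hcard : (p.toFinset.erase x).card = m := by
              rw [Finset.card_erase_of_mem hxpF, List.toFinset_card_of_nodup hnd, hplen]
              rfl
            obtain ⟨q, hq', hqF⟩ := pvCombos_surj _ m (p.toFinset.erase x) hsub hcard
            refine List.mem_append_right _
              (List.mem_map.mpr ⟨x :: q, List.mem_map_of_mem hq', ?_⟩)
            rw [List.toFinset_cons, hqF, Finset.insert_erase hxpF]
          · exact List.mem_append_left _ ((hyp_right p hp).mpr hnd)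
        rw [pvG_filter (fun p => p.all (fun y => decide (y ≠ x))) _ _ hdrop3,
          ← pvCombos_filter (fun y => decide (y ≠ x)) t (m + 1)]
        apply ih _ ht'len
        intro p hp
        have hxp : x ∉ p := hxnot hp
        constructor
        · intro hF
          rcases List.mem_append.mp hF with h1 | h1
          · exact ⟨by omega, (hyp_right p (hmem_t'' p hp)).mp h1⟩
          · obtain ⟨G, hG, hGe⟩ := List.mem_map.mp h1
            obtain ⟨q, _, rfl⟩ := List.mem_map.mp hG
            exfalso
            apply hxp
            have hx' : x ∈ p.toFinset := by
              rw [← hGe]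
              simp [List.toFinset_cons]
            simpa using hx'
        · rintro ⟨_, hpnd⟩
          exact List.mem_append_left _ ((hyp_right p (hmem_t'' p hp)).mpr hpnd)

-- ---- levels and the outer loops ----

lemma pvPrefix_sets (c : List Int) : ∀ (k : Nat) (F : Finset Int),
    F ∈ (pvPrefix (pvDedupR c) k).map List.toFinset ↔
      (F ⊆ c.toFinset ∧ F ≠ ∅ ∧ F.card ≤ k) := by
  intro k
  induction k with
  | zero => simp [pvPrefix, Finset.card_eq_zero]
  | succ k ih =>
    intro F
    constructor
    · intro hF
      obtain ⟨q, hq, rfl⟩ := List.mem_map.mp hF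
      rcases List.mem_append.mp hq with h1 | h1
      · obtain ⟨hsub, hne, hcard⟩ := (ih q.toFinset).mp (List.mem_map_of_mem h1)
        exact ⟨hsub, hne, by omega⟩
      · have hnd : q.Nodup :=
          ((nodup_pvDedupR c).sublist (pvCombos_sublist _ _ _ h1).1)
        have hlen : q.length = k + 1 := (pvCombos_sublist _ _ _ h1).2
        refine ⟨?_, ?_, ?_⟩
        · intro a ha
          have : a ∈ pvDedupR c := pvCombos_subset h1 a (by simpa using ha)
          simpa using (mem_pvDedupR c a).mp this
        · intro hc
          have hq0 : q = [] := by simpa using hc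
          rw [hq0] at hlen
          simp at hlen
        · rw [List.toFinset_card_of_nodup hnd, hlen]
    · rintro ⟨hsub, hne, hcard⟩
      by_cases h : F.card ≤ k
      · obtain ⟨q, hq, rfl⟩ := List.mem_map.mp ((ih F).mpr ⟨hsub, hne, h⟩)
        exact List.mem_map_of_mem (List.mem_append_left _ hq)
      · have hcard' : F.card = k + 1 := by omega
        have hsub' : F ⊆ (pvDedupR c).toFinset := by
          rw [toFinset_pvDedupR]; exact hsub
        obtain ⟨q, hq, hqF⟩ := pvCombos_surj (pvDedupR c) (k + 1) F hsub' hcard'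
        exact hqF ▸ List.mem_map_of_mem (List.mem_append_right _ hq)

lemma pvLevel (c : List Int) (k : Nat) :
    (pvCombos (k + 1) c).foldl
        (fun acc p =>
          if acc.all (fun cc => decide (p.toFinset ≠ cc.toFinset)) then acc ++ [p] else acc)
        (pvPrefix (pvDedupR c) k)
      = pvPrefix (pvDedupR c) (k + 1) := by
  rw [pvG_foldl]
  show _ = pvPrefix (pvDedupR c) k ++ pvCombos (k + 1) (pvDedupR c)
  congr 1
  apply pvCore c.length c le_rfl
  intro p hp
  have hplen : p.length = k + 1 := (pvCombos_sublist _ _ _ hp).2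
  have hpne : p ≠ [] := by
    intro hc
    rw [hc] at hplen
    simp at hplen
  rw [pvPrefix_sets c k p.toFinset]
  have hsub : p.toFinset ⊆ c.toFinset := by
    intro a ha
    simpa using pvCombos_subset hp a (by simpa using ha)
  have hne : p.toFinset ≠ ∅ := by
    simp [List.toFinset_eq_empty_iff, hpne]
  have hcle : p.toFinset.card ≤ p.length := List.toFinset_card_le p
  constructor
  · rintro ⟨_, _, hcard⟩
    exact ⟨by omega, pvNotNodup_iff_card.mpr (by omega)⟩
  · rintro ⟨_, hpnd⟩
    have := pvNotNodup_iff_card.mp hpnd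
    exact ⟨hsub, hne, by omega⟩

lemma pvPrefix_stable (d : List Int) : ∀ (k : Nat), d.length ≤ k →
    pvPrefix d k = pvPrefix d d.length := by
  intro k
  induction k with
  | zero =>
    intro h
    have h0 : d.length = 0 := by omega
    rw [h0]
  | succ k ih =>
    intro h
    by_cases h' : d.length ≤ k
    · show pvPrefix d k ++ pvCombos (k + 1) d = _
      rw [pvCombos_eq_nil d (k + 1) (by omega), List.append_nil]
      exact ih h'
    · have : d.length = k + 1 := by omega
      rw [this]

lemma pyRange_one_eq : ∀ (K : Nat) (a : Int),
    PySem.List.pyRange a (a + K) 1 = (List.range K).map (fun i : Nat => a + (i : Int)) := by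
  intro K
  induction K with
  | zero => intro a; simp [PySem.List.pyRange]
  | succ K ih =>
    intro a
    have h1 : a + ((K : Int) + 1) = (a + K) + 1 := by ring
    push_cast
    rw [h1, PySem.List.pyRange_one_succ_right (by omega), ih a, List.range_succ]
    simp

lemma pvAfold (c : List Int) : ∀ (k : Nat),
    ((List.range k).map (fun i : Nat => (1 : Int) + (i : Int))).foldl
        (fun acc n =>
          (pvCombos n.toNat c).foldl
            (fun acc p =>
              if acc.all (fun cc => decide (p.toFinset ≠ cc.toFinset)) then acc ++ [p] else acc)
            acc)
        []
      = pvPrefix (pvDedupR c) k := by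
  intro k
  induction k with
  | zero => rfl
  | succ k ih =>
    rw [List.range_succ, List.map_append, List.foldl_append, ih]
    show (pvCombos ((1 : Int) + (k : Int)).toNat c).foldl _ _ = _
    have : ((1 : Int) + (k : Int)).toNat = k + 1 := by omega
    rw [this]
    exact pvLevel c k

lemma pvBfold (d : List Int) : ∀ (k : Nat),
    ((List.range k).map (fun i : Nat => (1 : Int) + (i : Int))).foldl
        (fun result n =>
          (pvCombos n.toNat d).foldl (fun result p => result ++ [p]) result)
        []
      = pvPrefix d k := by
  intro k
  induction k with
  | zero => rfl
  | succ k ih =>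
    rw [List.range_succ, List.map_append, List.foldl_append, ih]
    show (pvCombos ((1 : Int) + (k : Int)).toNat d).foldl _ _ = _
    have h1 : ((1 : Int) + (k : Int)).toNat = k + 1 := by omega
    rw [h1, PySem.List.foldl_append_singleton]
    rfl

lemma pyRange_one_nil {a b : Int} (h : b ≤ a) : PySem.List.pyRange a b 1 = [] := by
  simp [PySem.List.pyRange]
  omega

-- ===== VERDICT (by name: the statement is the Claim_ definition above) =====
theorem build_combination_matrix_spec : Claim_equal_build_combination_matrix := by
  intro compounds nmax _
  unfold Spec_build_combination_matrix
  unfold build_combination_matrix build_combination_matrix_alt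
  by_cases hc : compounds = []
  · simp [hc]
  · have hlen : compounds.length > 0 := List.length_pos_iff.mpr hc
    rw [if_pos hlen, if_neg hc]
    simp only [dedup_eq_pvDedupR]
    by_cases hneg : nmax < 1
    · have hm : min nmax (((pvDedupR compounds).length : Nat) : Int) + 1 ≤ 1 := by
        have := min_le_left nmax (((pvDedupR compounds).length : Nat) : Int)
        omega
      rw [pyRange_one_nil (by omega), pyRange_one_nil hm]
      rfl
    · have h1 : nmax + 1 = 1 + (nmax.toNat : Int) := by omega
      rw [h1, pyRange_one_eq nmax.toNat 1, pvAfold compounds nmax.toNat]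
      have hmin : (0 : Int) ≤ min nmax (((pvDedupR compounds).length : Nat) : Int) := by
        have h5 := le_min (show (0:Int) ≤ nmax by omega)
          (show (0:Int) ≤ (((pvDedupR compounds).length : Nat) : Int) by positivity)
        exact h5
      have h2 : min nmax (((pvDedupR compounds).length : Nat) : Int) + 1
          = 1 + (((min nmax (((pvDedupR compounds).length : Nat) : Int)).toNat : Nat) : Int) := by
        omega
      rw [h2, pyRange_one_eq _ 1, pvBfold (pvDedupR compounds)]
      have h3 : (min nmax (((pvDedupR compounds).length : Nat) : Int)).toNat
          = min nmax.toNat (pvDedupR compounds).length := by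
        omega
      rw [h3]
      by_cases h4 : nmax.toNat ≤ (pvDedupR compounds).length
      · rw [min_eq_left h4]
      · rw [min_eq_right (by omega), pvPrefix_stable (pvDedupR compounds) nmax.toNat (by omega)]
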